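-- pv_equiv track=rewrite | github.com/Soysakiaytuno/Proyecto-final-BD-Progra | Defensa de Proyecto-Mallea/Codigo de defensa-Mallea.py | Parentesis_Recursivo
-- ===== SOURCE A (Python) =====
-- def Parentesis_Recursivo(cadena:str, z:int):
--     if z == len(cadena):
--         return ')'
--     if z == 0:
--         return '('+cadena[z] + Parentesis_Recursivo(cadena, z+1)
--     elif z < len(cadena)/2:
--         return '('+cadena[z] + Parentesis_Recursivo(cadena, z+1)
--     elif z > len(cadena)/2:
--         return ')'+cadena[z] + Parentesis_Recursivo(cadena, z+1)
--     elif z == len(cadena)/2: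
--         return '()'+cadena[z] + Parentesis_Recursivo(cadena, z+1)
-- ===== SOURCE B (Python) =====
-- def Parentesis_Recursivo(cadena: str, z: int):
--     # Closed-form per position: one join over range(z, n), marker chosen by index vs midpoint.
--     n = len(cadena)
--     def marker(i):
--         if i == 0 or 2 * i < n:
--             return '('
--         if 2 * i > n:
--             return ')'
--         return '()'
--     return ''.join(marker(i) + cadena[i] for i in range(z, n)) + ')'
-- ===== Notes on version B (the rewrite author's own statement) =====
-- stated objective: idiomatic
-- what changed: Replaced the head recursion with a single join over range(z, len), computing each position's marker from the index-vs-midpoint comparison (integer 2*i vs n instead of float division).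
import Mathlib
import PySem

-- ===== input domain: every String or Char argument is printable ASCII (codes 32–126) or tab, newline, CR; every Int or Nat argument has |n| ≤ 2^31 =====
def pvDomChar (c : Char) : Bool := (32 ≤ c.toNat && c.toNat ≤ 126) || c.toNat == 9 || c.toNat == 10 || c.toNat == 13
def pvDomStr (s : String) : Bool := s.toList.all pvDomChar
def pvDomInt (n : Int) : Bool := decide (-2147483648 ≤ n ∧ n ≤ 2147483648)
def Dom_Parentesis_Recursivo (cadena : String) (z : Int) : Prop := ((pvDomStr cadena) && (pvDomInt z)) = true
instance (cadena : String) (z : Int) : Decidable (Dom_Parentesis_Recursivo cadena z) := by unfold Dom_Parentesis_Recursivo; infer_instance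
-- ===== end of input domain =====

-- B replaces A's head recursion by one join over range(z, len) with a per-index marker (idiomatic decomposition, same values).

-- ===== PORT A =====
-- Recursive helper, A's code step for step. 'z < len(cadena)/2' compares ints with a float
-- midpoint; for |z|, len ≤ 2^31 the float is exact, so it is ported as '2*z < len' (likewise >).
-- The 'none' branch is Python's IndexError (excluded by Pre_).
def pvGoA (s : List Char) (z : Int) : String :=
  if z = (s.length : Int) then ")"
  else
    match h : PySem.List.pyGet? s z with
    | none => ""  -- IndexError in Python; outside Pre_
    | some c =>
      if z = 0 then "(" ++ c.toString ++ pvGoA s (z + 1)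
      else if 2 * z < (s.length : Int) then "(" ++ c.toString ++ pvGoA s (z + 1)
      else if 2 * z > (s.length : Int) then ")" ++ c.toString ++ pvGoA s (z + 1)
      else "()" ++ c.toString ++ pvGoA s (z + 1)
termination_by (s.length + 1 - z).toNat
decreasing_by
  all_goals
    have hr : ¬ (PySem.List.pyGet? s z = none) := by simp [h]
    rw [PySem.List.pyGet?_eq_none_iff] at hr
    simp [PySem.Raise.InRange] at hr
    omega

def Parentesis_Recursivo (cadena : String) (z : Int) : String :=
  pvGoA cadena.toList z

-- ===== PORT B =====
-- Source B: marker(i) chosen by integer midpoint comparison; ''.join over range(z, n); final ")".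
def pvMarker (n i : Int) : String :=
  if i = 0 ∨ 2 * i < n then "("
  else if 2 * i > n then ")"
  else "()"

def Parentesis_Recursivo_alt (cadena : String) (z : Int) : String :=
  let s := cadena.toList
  let n : Int := (s.length : Int)
  String.join ((PySem.List.pyRange z n 1).map (fun i =>
    pvMarker n i ++
      match PySem.List.pyGet? s i with
      | some c => c.toString
      | none => ""))  -- IndexError in Python (i < -n only); outside Pre_
    ++ ")"

-- ===== PRECONDITION & SPEC =====
-- A raises IndexError exactly when z lies outside [-len, len] (for z < -len via cadena[z]'s
-- wraparound failing, for z > len via cadena[z] directly); Pre_ admits every input on which A returns.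
def Pre_Parentesis_Recursivo (cadena : String) (z : Int) : Prop :=
  -(cadena.toList.length : Int) ≤ z ∧ z ≤ (cadena.toList.length : Int)
instance (cadena : String) (z : Int) : Decidable (Pre_Parentesis_Recursivo cadena z) := by
  unfold Pre_Parentesis_Recursivo; infer_instance

def pvWitness_Parentesis_Recursivo : String × Int := ("abc", 1)

def Spec_Parentesis_Recursivo (cadena : String) (z : Int) (out : String) : Prop := out = Parentesis_Recursivo_alt cadena z
instance (cadena : String) (z : Int) (out : String) : Decidable (Spec_Parentesis_Recursivo cadena z out) := by unfold Spec_Parentesis_Recursivo; infer_instance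

-- ===== CLAIM (what is proved, stated in full; the proofs are below) =====
def Claim_equal_Parentesis_Recursivo : Prop := ∀ (cadena : String) (z : Int), Dom_Parentesis_Recursivo cadena z → Pre_Parentesis_Recursivo cadena z → Spec_Parentesis_Recursivo cadena z (Parentesis_Recursivo cadena z)


-- ===== LEMMAS AND PROOFS =====

theorem pvFoldlAppend (l : List String) : ∀ (a : String),
    l.foldl (· ++ ·) a = a ++ l.foldl (· ++ ·) "" := by
  induction l with
  | nil => intro a; simp
  | cons x l ih =>
    intro a
    simp only [List.foldl_cons]
    rw [ih (a ++ x), ih ("" ++ x)]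
    simp [String.append_assoc]

-- A's recursion computes, for every admitted start z, the join of B's per-index pieces
-- over range(z, n), followed by ")".
theorem pvGoA_eq_join (s : List Char) :
    ∀ (m : Nat) (z : Int), (s.length + 1 - z).toNat = m →
      -(s.length : Int) ≤ z → z ≤ (s.length : Int) →
      pvGoA s z =
        String.join ((PySem.List.pyRange z (s.length : Int) 1).map (fun i =>
          pvMarker (s.length : Int) i ++
            match PySem.List.pyGet? s i with
            | some c => c.toString
            | none => "")) ++ ")" := by
  intro m
  induction m using Nat.strong_induction_on with
  | _ m ih =>
    intro z hm hlo hhi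
    rw [pvGoA]
    by_cases hz : z = (s.length : Int)
    · rw [hz, PySem.List.pyRange_one_eq_nil (le_refl _)]
      simp [String.join]
    · have hzlt : z < (s.length : Int) := lt_of_le_of_ne hhi hz
      rw [PySem.List.pyRange_one_cons hzlt]
      simp only [List.map_cons, String.join, List.foldl_cons, hz, if_false]
      cases h : PySem.List.pyGet? s z with
      | none =>
        rw [PySem.List.pyGet?_eq_none_iff] at h
        exfalso; apply h
        simp [PySem.Raise.InRange]; omega
      | some c =>
        have hrec := ih ((s.length + 1 - (z + 1)).toNat) (by omega) (z + 1) rfl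
          (by omega) (by omega)
        simp only [String.join] at hrec
        rw [pvFoldlAppend, hrec]
        simp only [pvMarker, String.empty_append, String.append_assoc]
        split_ifs with h0 h1 h2 h3 <;> first | rfl | omega

-- ===== VERDICT (by name: the statement is the Claim_ definition above) =====
theorem Parentesis_Recursivo_spec : Claim_equal_Parentesis_Recursivo := by
  intro cadena z _ hpre
  unfold Spec_Parentesis_Recursivo Parentesis_Recursivo Parentesis_Recursivo_alt
  exact pvGoA_eq_join cadena.toList _ z rfl hpre.1 hpre.2
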